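-- pv_equiv track=rewrite | github.com/TamimLikhon/Problem_Solving | Contest/100312. Find the Minimum Cost Array Permutation.py | min_score_permutation
-- ===== SOURCE A (Python) =====
-- def min_score_permutation(nums):
--     n = len(nums)
--     perm = [0] * n
--     visited = [False] * n
--
--     for num in sorted(nums):
--         best_pos = -1
--         best_diff = float('inf')
--         for i in range(n):
--             if not visited[i]:
--                 diff = abs(i - num)
--                 if diff < best_diff:
--                     best_diff = diff
--                     best_pos = i
--         perm[best_pos] = num
--         visited[best_pos] = True
--
--     return perm
-- ===== SOURCE B (Python) =====
-- def min_score_permutation(nums):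
--     # Same greedy: assign each value (ascending) to the nearest free position,
--     # ties to the smaller position; free positions kept as a sorted list with
--     # binary search instead of an O(n) scan over a visited array.
--     n = len(nums)
--     perm = [0] * n
--     avail = list(range(n))
--     for num in sorted(nums):
--         lo, hi = 0, len(avail)
--         while lo < hi:
--             mid = (lo + hi) // 2
--             if avail[mid] < num:
--                 lo = mid + 1
--             else:
--                 hi = mid
--         j = lo
--         if j == len(avail) or (j > 0 and num - avail[j - 1] <= avail[j] - num):
--             j -= 1
--         pos = avail.pop(j)
--         perm[pos] = num
--     return perm
-- ===== Notes on version B (the rewrite author's own statement) =====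
-- stated objective: faster
-- what changed: Replaces the O(n) inner scan over a visited array by a sorted list of free positions queried with hand-written binary search (nearest neighbour = predecessor/successor of the bisection point, tie to the predecessor) and shrunk with pop.
import Mathlib
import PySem

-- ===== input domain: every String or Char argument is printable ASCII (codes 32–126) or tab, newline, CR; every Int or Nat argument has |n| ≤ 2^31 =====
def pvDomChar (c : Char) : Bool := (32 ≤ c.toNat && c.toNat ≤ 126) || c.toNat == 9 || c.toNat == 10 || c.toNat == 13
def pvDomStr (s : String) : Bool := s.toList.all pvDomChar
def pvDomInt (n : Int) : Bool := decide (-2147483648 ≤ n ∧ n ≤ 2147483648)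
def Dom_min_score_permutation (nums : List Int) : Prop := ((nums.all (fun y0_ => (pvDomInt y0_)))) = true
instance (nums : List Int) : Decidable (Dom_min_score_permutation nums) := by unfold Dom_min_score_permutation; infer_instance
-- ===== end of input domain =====

-- B replaces A's O(n) scan over a visited array by binary search on the sorted list of free positions (faster inner step).

-- ===== PORT A =====
-- One iteration of A's outer loop; `float('inf')` is modelled as `none : Option Int`
-- (the first unvisited index always satisfies `diff < inf`, i.e. the `none` branch is `true`).
def pvStepA (n : Int) (st : List Int × List Bool) (num : Int) : List Int × List Bool :=
  let best := (PySem.List.pyRange 0 n 1).foldl (fun (acc : Int × Option Int) i =>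
    if !(PySem.List.pyGetD st.2 i false) then
      let diff := |i - num|
      if (match acc.2 with | none => true | some d => decide (diff < d)) then (i, some diff) else acc
    else acc) (-1, none)
  (PySem.List.pySetD st.1 best.1 num, PySem.List.pySetD st.2 best.1 true)

def min_score_permutation (nums : List Int) : List Int :=
  ((PySem.List.sorted nums id).foldl (pvStepA (nums.length : Int))
    (List.replicate nums.length 0, List.replicate nums.length false)).1

-- ===== PORT B =====
-- Source B's hand-written bisect_left `while lo < hi` loop, as recursion on `hi - lo`.
def pvBisect (a : List Int) (x : Int) (lo hi : Nat) : Nat :=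
  if _h : lo < hi then
    let mid := (lo + hi) / 2
    if PySem.List.pyGetD a (mid : Int) 0 < x then pvBisect a x (mid + 1) hi
    else pvBisect a x lo mid
  else lo
termination_by hi - lo
decreasing_by all_goals omega

-- One iteration of B's loop over (perm, avail); `avail.pop(j)` is PySem.List.pop?
-- (`none` is unreachable: avail is nonempty whenever the loop body runs).
def pvStepB (st : List Int × List Int) (num : Int) : List Int × List Int :=
  let j0 := pvBisect st.2 num 0 st.2.length
  let j := if j0 = st.2.length ∨ (0 < j0 ∧ num - PySem.List.pyGetD st.2 ((j0 : Int) - 1) 0 ≤ PySem.List.pyGetD st.2 (j0 : Int) 0 - num) then j0 - 1 else j0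
  match PySem.List.pop? st.2 (j : Int) with
  | some r => (PySem.List.pySetD st.1 r.1 num, r.2)
  | none => st

def min_score_permutation_alt (nums : List Int) : List Int :=
  ((PySem.List.sorted nums id).foldl pvStepB
    (List.replicate nums.length 0, PySem.List.pyRange 0 (nums.length : Int) 1)).1

-- ===== PRECONDITION & SPEC =====
def Spec_min_score_permutation (nums : List Int) (out : List Int) : Prop := out = min_score_permutation_alt nums
instance (nums : List Int) (out : List Int) : Decidable (Spec_min_score_permutation nums out) := by unfold Spec_min_score_permutation; infer_instance

-- ===== CLAIM (what is proved, stated in full; the proofs are below) =====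
def Claim_equal_min_score_permutation : Prop := ∀ (nums : List Int), Dom_min_score_permutation nums → Spec_min_score_permutation nums (min_score_permutation nums)

-- ===== LEMMAS AND PROOFS =====

-- A's inner-loop body once the visited test has been split off by List.foldl_filter.
def pvCore (num : Int) (acc : Int × Option Int) (i : Int) : Int × Option Int :=
  let diff := |i - num|
  if (match acc.2 with | none => true | some d => decide (diff < d)) then (i, some diff) else acc

-- bisect returns the unique split point t, provided lo ≤ t ≤ hi.
theorem pvBisect_eq (l : List Int) (x : Int) (t : Nat)
    (h1 : ∀ k (h : k < l.length), k < t → l[k] < x)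
    (h2 : ∀ k (h : k < l.length), t ≤ k → x ≤ l[k])
    (lo hi : Nat) (hlo : lo ≤ t) (hhi : t ≤ hi) (hlen : hi ≤ l.length) :
    pvBisect l x lo hi = t := by
  rw [pvBisect]
  by_cases h : lo < hi
  · rw [dif_pos h]
    have hmid : (lo + hi) / 2 < l.length := by omega
    have hget : PySem.List.pyGetD l (((lo + hi) / 2 : Nat) : Int) 0 = l[(lo + hi) / 2] := by
      rw [PySem.List.pyGetD_natCast, List.getD_eq_getElem?_getD, List.getElem?_eq_getElem hmid]
      rfl
    simp only [hget]
    by_cases hc : l[(lo + hi) / 2] < x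
    · rw [if_pos hc]
      have : (lo + hi) / 2 + 1 ≤ t := by
        by_contra hcon
        exact absurd (h2 _ hmid (by omega)) (by omega)
      exact pvBisect_eq l x t h1 h2 _ hi this hhi hlen
    · rw [if_neg hc]
      have : t ≤ (lo + hi) / 2 := by
        by_contra hcon
        exact absurd (h1 _ hmid (by omega)) (by omega)
      exact pvBisect_eq l x t h1 h2 lo _ hlo this (by omega)
  · rw [dif_neg h]; omega
termination_by hi - lo
decreasing_by all_goals omega

-- phase 1: over a strictly increasing list entirely below num the fold ends at the last element.
theorem pvFold_phase1 (num : Int) (l : List Int) (hs : l.Pairwise (· < ·))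
    (hlt : ∀ i ∈ l, i < num) (h : l ≠ []) :
    l.foldl (pvCore num) (-1, none) = (l.getLast h, some (num - l.getLast h)) := by
  induction l using List.reverseRecOn with
  | nil => exact absurd rfl h
  | append_singleton l' a ih =>
    have ha : a < num := hlt a (by simp)
    have habs : |a - num| = num - a := by rw [abs_of_nonpos (by omega)]; ring
    rw [List.foldl_append, List.getLast_append]
    rcases eq_or_ne l' [] with hnil | hne
    · subst hnil
      simp [pvCore, habs]
    · have hs' : l'.Pairwise (· < ·) := hs.sublist (List.sublist_append_left _ _)
      have hlt' : ∀ i ∈ l', i < num := fun i hi => hlt i (List.mem_append_left _ hi)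
      rw [ih hs' hlt' hne]
      have hlast : l'.getLast hne < a := by
        have := (List.pairwise_append.mp hs).2.2
        exact this _ (List.getLast_mem hne) a (by simp)
      simp only [List.foldl_cons, List.foldl_nil, pvCore, habs]
      rw [if_pos (by simp only [decide_eq_true_eq]; omega)]
      simp

-- no element at distance ≥ d changes the state.
theorem pvFold_no_improve (num : Int) (p d : Int) (l : List Int)
    (hge : ∀ i ∈ l, d ≤ |i - num|) :
    l.foldl (pvCore num) (p, some d) = (p, some d) := by
  induction l with
  | nil => rfl
  | cons h t ih =>
    have hd := hge h (by simp)
    have : pvCore num (p, some d) h = (p, some d) := by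
      simp only [pvCore]
      rw [if_neg]
      simp only [decide_eq_true_eq, not_lt]
      omega
    rw [List.foldl_cons, this]
    exact ih (fun i hi => hge i (List.mem_cons_of_mem _ hi))

-- phase 2 from none: first element ≥ num wins.
theorem pvFold_phase2_none (num : Int) (b : Int) (l : List Int)
    (hs : (b :: l).Pairwise (· < ·)) (hge : ∀ i ∈ b :: l, num ≤ i) (p : Int) :
    (b :: l).foldl (pvCore num) (p, none) = (b, some (b - num)) := by
  have hb : num ≤ b := hge b (by simp)
  have habs : |b - num| = b - num := abs_of_nonneg (by omega)
  have hstep : pvCore num (p, none) b = (b, some (b - num)) := by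
    simp only [pvCore, if_pos, habs]
  rw [List.foldl_cons, hstep]
  refine pvFold_no_improve num b (b - num) l (fun i hi => ?_)
  have h1 : b < i := (List.pairwise_cons.mp hs).1 i hi
  have h2 : num ≤ i := hge i (List.mem_cons_of_mem _ hi)
  rw [abs_of_nonneg (by omega : (0:Int) ≤ i - num)]
  omega

-- phase 2 from some d: head wins iff it is strictly closer.
theorem pvFold_phase2_some (num : Int) (b : Int) (l : List Int)
    (hs : (b :: l).Pairwise (· < ·)) (hge : ∀ i ∈ b :: l, num ≤ i) (p d : Int) :
    (b :: l).foldl (pvCore num) (p, some d) =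
      if b - num < d then (b, some (b - num)) else (p, some d) := by
  have hb : num ≤ b := hge b (by simp)
  have habs : |b - num| = b - num := abs_of_nonneg (by omega)
  have hrest : ∀ i ∈ l, b - num ≤ |i - num| := fun i hi => by
    have h1 : b < i := (List.pairwise_cons.mp hs).1 i hi
    rw [abs_of_nonneg (by omega : (0:Int) ≤ i - num)]
    omega
  by_cases hc : b - num < d
  · rw [if_pos hc]
    have hstep : pvCore num (p, some d) b = (b, some (b - num)) := by
      simp only [pvCore, habs]
      rw [if_pos (by simpa using hc)]
    rw [List.foldl_cons, hstep]
    exact pvFold_no_improve num b (b - num) l hrest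
  · rw [if_neg hc]
    have hstep : pvCore num (p, some d) b = (p, some d) := by
      simp only [pvCore, habs]
      rw [if_neg (by simpa using hc)]
    rw [List.foldl_cons, hstep]
    refine pvFold_no_improve num p d l (fun i hi => le_trans (by omega) (hrest i hi))

-- removing one occurrence by value = removing it by index, on a Nodup list.
theorem pvErase_eq_eraseIdx (l : List Int) (hnd : l.Nodup) :
    ∀ j (h : j < l.length), l.erase l[j] = l.eraseIdx j := by
  induction l with
  | nil => intro j h; simp at h
  | cons a t ih =>
    intro j h
    match j with
    | 0 => simp
    | (j' + 1) =>
      have hj' : j' < t.length := by simpa using h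
      have heq : (a :: t)[j' + 1] = t[j'] := by simp
      have hmem : (a :: t)[j' + 1] ∈ t := by rw [heq]; exact List.getElem_mem _
      have hne : a ≠ (a :: t)[j' + 1] := fun he => (List.nodup_cons.mp hnd).1 (he ▸ hmem)
      rw [List.eraseIdx_cons_succ, List.erase_cons_tail (by simpa using hne)]
      rw [heq, ih (List.nodup_cons.mp hnd).2 j' hj']

-- filtering with one more position marked = erasing that value.
theorem pvFilter_erase (p q : Int → Bool) (b : Int) :
    ∀ l : List Int, l.Nodup → b ∈ l → p b = true →
    (∀ i ∈ l, q i = (decide (i ≠ b) && p i)) → l.filter q = (l.filter p).erase b := by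
  intro l
  induction l with
  | nil => intro _ hb; simp at hb
  | cons a t ih =>
    intro hnd hb hpb hq
    have hqa := hq a (by simp)
    rcases eq_or_ne a b with rfl | hab
    · have hnotin : a ∉ t := (List.nodup_cons.mp hnd).1
      have hqt : t.filter q = t.filter p := List.filter_congr (fun i hi => by
        have : i ≠ a := fun he => hnotin (he ▸ hi)
        simp [hq i (List.mem_cons_of_mem _ hi), this])
      simp only [List.filter_cons, hpb, hqa]
      simp [hqt]
    · have hbt : b ∈ t := by
        rcases List.mem_cons.mp hb with h | h
        · exact absurd h.symm hab
        · exact h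
      have hqa' : q a = p a := by simp [hqa, hab]
      have ht := ih (List.nodup_cons.mp hnd).2 hbt hpb (fun i hi => hq i (List.mem_cons_of_mem _ hi))
      by_cases hpa : p a = true
      · simp only [List.filter_cons, hpa, hqa', if_pos]
        rw [List.erase_cons_tail (by simpa using hab)]
        simp [ht]
      · simp only [List.filter_cons, hqa']
        rw [if_neg hpa, if_neg hpa, ht]

-- marking the chosen position = erasing it from the free list.
theorem pvNewAvail (n : Nat) (visited : List Bool) (avail : List Int)
    (hlen : visited.length = n)
    (hav : avail = (PySem.List.pyRange 0 (n : Int) 1).filter (fun i => !(PySem.List.pyGetD visited i false)))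
    (j' : Nat) (hj' : j' < avail.length) :
    avail.eraseIdx j' =
      (PySem.List.pyRange 0 (n : Int) 1).filter
        (fun i => !(PySem.List.pyGetD (PySem.List.pySetD visited (avail[j']) true) i false)) := by
  have hb_mem : avail[j'] ∈ avail := List.getElem_mem _
  have hmemP : avail[j'] ∈ (PySem.List.pyRange 0 (n : Int) 1).filter (fun i => !(PySem.List.pyGetD visited i false)) := hav ▸ hb_mem
  have hbp : (!(PySem.List.pyGetD visited (avail[j']) false)) = true := (List.mem_filter.mp hmemP).2
  have hbR : avail[j'] ∈ PySem.List.pyRange 0 (n : Int) 1 := List.mem_of_mem_filter hmemP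
  have hbb : 0 ≤ avail[j'] ∧ avail[j'] < (n : Int) := by
    have := PySem.List.mem_pyRange_one.mp hbR
    omega
  have hnd : avail.Nodup := by
    rw [hav]
    exact ((PySem.List.pairwise_lt_pyRange_one 0 (n : Int)).filter _).imp ne_of_lt
  rw [← pvErase_eq_eraseIdx avail hnd j' hj']
  have hq : ∀ i ∈ PySem.List.pyRange 0 (n : Int) 1,
      (!(PySem.List.pyGetD (PySem.List.pySetD visited (avail[j']) true) i false))
        = (decide (i ≠ avail[j']) && (!(PySem.List.pyGetD visited i false))) := by
    intro i hiR
    have hib : 0 ≤ i ∧ i < (n : Int) := by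
      have := PySem.List.mem_pyRange_one.mp hiR
      omega
    rw [PySem.List.pySetD_of_nonneg visited true hbb.1,
        PySem.List.pyGetD_of_nonneg _ false hib.1,
        List.getD_eq_getElem?_getD, List.getElem?_set]
    rcases eq_or_ne i (avail[j']) with rfl | hne
    · rw [if_pos rfl, if_pos (by omega)]
      simp
    · have hton : (avail[j']).toNat ≠ i.toNat := by omega
      rw [if_neg hton]
      rw [PySem.List.pyGetD_of_nonneg _ false hib.1, List.getD_eq_getElem?_getD]
      simp [hne]
  conv_rhs =>
    rw [pvFilter_erase (fun i => !(PySem.List.pyGetD visited i false))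
      (fun i => !(PySem.List.pyGetD (PySem.List.pySetD visited (avail[j']) true) i false))
      (avail[j']) (PySem.List.pyRange 0 (n : Int) 1)
      (PySem.List.nodup_pyRange_one 0 (n : Int)) hbR hbp hq]
  rw [← hav]

-- A's inner loop is the plain fold of pvCore over the free positions.
theorem pvAfold (n : Nat) (visited : List Bool) (avail : List Int) (num : Int)
    (hav : avail = (PySem.List.pyRange 0 (n : Int) 1).filter (fun i => !(PySem.List.pyGetD visited i false))) :
    (PySem.List.pyRange 0 (n : Int) 1).foldl (fun (acc : Int × Option Int) i =>
      if !(PySem.List.pyGetD visited i false) then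
        let diff := |i - num|
        if (match acc.2 with | none => true | some d => decide (diff < d)) then (i, some diff) else acc
      else acc) (-1, none) = avail.foldl (pvCore num) (-1, none) := by
  rw [hav, List.foldl_filter]
  rfl

-- given the chosen index j', both steps produce the same components.
theorem pvStep_core (n : Nat) (perm : List Int) (visited : List Bool) (avail : List Int) (num : Int)
    (hlen : visited.length = n)
    (hav : avail = (PySem.List.pyRange 0 (n : Int) 1).filter (fun i => !(PySem.List.pyGetD visited i false)))
    (j' : Nat) (hj' : j' < avail.length)
    (hbest : (avail.foldl (pvCore num) (-1, none)).1 = avail[j'])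
    (hjB : (if pvBisect avail num 0 avail.length = avail.length ∨
              (0 < pvBisect avail num 0 avail.length ∧
               num - PySem.List.pyGetD avail ((pvBisect avail num 0 avail.length : Int) - 1) 0 ≤
                 PySem.List.pyGetD avail ((pvBisect avail num 0 avail.length : Int)) 0 - num)
            then pvBisect avail num 0 avail.length - 1 else pvBisect avail num 0 avail.length) = j') :
    (pvStepB (perm, avail) num).1 = (pvStepA (n : Int) (perm, visited) num).1 ∧
    (pvStepA (n : Int) (perm, visited) num).2.length = n ∧
    (pvStepB (perm, avail) num).2 =
      (PySem.List.pyRange 0 (n : Int) 1).filter (fun i => !(PySem.List.pyGetD (pvStepA (n : Int) (perm, visited) num).2 i false)) ∧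
    (pvStepB (perm, avail) num).2.length + 1 = avail.length := by
  have hA : pvStepA (n : Int) (perm, visited) num =
      (PySem.List.pySetD perm (avail[j']) num, PySem.List.pySetD visited (avail[j']) true) := by
    simp only [pvStepA]
    rw [pvAfold n visited avail num hav, hbest]
  have hB : pvStepB (perm, avail) num =
      (PySem.List.pySetD perm (avail[j']) num, avail.eraseIdx j') := by
    simp only [pvStepB]
    rw [hjB, PySem.List.pop?_natCast avail j' hj']
  refine ⟨by rw [hA, hB], ?_, ?_, ?_⟩
  · rw [hA]
    simp [PySem.List.length_pySetD, hlen]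
  · rw [hA, hB]
    exact pvNewAvail n visited avail hlen hav j' hj'
  · rw [hB]
    simp only [List.length_eraseIdx, if_pos hj']
    omega

-- the step lemma: under the correspondence, one A-step matches one B-step.
theorem pvStep_eq (n : Nat) (perm : List Int) (visited : List Bool) (avail : List Int) (num : Int)
    (hlen : visited.length = n)
    (hav : avail = (PySem.List.pyRange 0 (n : Int) 1).filter (fun i => !(PySem.List.pyGetD visited i false)))
    (hne : avail ≠ []) :
    (pvStepB (perm, avail) num).1 = (pvStepA (n : Int) (perm, visited) num).1 ∧
    (pvStepA (n : Int) (perm, visited) num).2.length = n ∧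
    (pvStepB (perm, avail) num).2 =
      (PySem.List.pyRange 0 (n : Int) 1).filter (fun i => !(PySem.List.pyGetD (pvStepA (n : Int) (perm, visited) num).2 i false)) ∧
    (pvStepB (perm, avail) num).2.length + 1 = avail.length := by
  have hs : avail.Pairwise (· < ·) := by
    rw [hav]
    exact (PySem.List.pairwise_lt_pyRange_one 0 (n : Int)).filter _
  have hpos : 0 < avail.length := List.length_pos_of_ne_nil hne
  set pLt : Int → Bool := fun i => decide (i < num) with hpdef
  set l1 := avail.takeWhile pLt with hl1def
  set l2 := avail.dropWhile pLt with hl2def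
  have hsplit : l1 ++ l2 = avail := List.takeWhile_append_dropWhile
  have hlen12 : l1.length + l2.length = avail.length := by
    rw [← hsplit]; simp
  have hlt1 : ∀ i ∈ l1, i < num := fun i hi => by
    have := List.mem_takeWhile_imp hi
    simpa [hpdef] using this
  have hpl1 : l1.Pairwise (· < ·) := List.Pairwise.sublist (List.takeWhile_sublist pLt) hs
  have hpl2 : l2.Pairwise (· < ·) := List.Pairwise.sublist (List.dropWhile_sublist pLt) hs
  have hge2 : ∀ i ∈ l2, num ≤ i := by
    intro i hi
    have hne2 : l2 ≠ [] := List.ne_nil_of_mem hi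
    have hhead : num ≤ l2.head hne2 := by
      have := List.head_dropWhile_not pLt (l := avail) (w := by rw [← hl2def]; exact hne2)
      simp only [hpdef, decide_eq_false_iff_not, not_lt] at this
      exact this
    have hp2' : (l2.head hne2 :: l2.tail).Pairwise (· < ·) := by
      rw [List.cons_head_tail]; exact hpl2
    rw [← List.cons_head_tail hne2] at hi
    rcases List.mem_cons.mp hi with heq | htl
    · rw [heq]; exact hhead
    · exact le_trans hhead (le_of_lt ((List.pairwise_cons.mp hp2').1 i htl))
  have hget1 : ∀ k (hk : k < l1.length), avail[k]'(by omega) = l1[k] := by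
    intro k hk
    rw [List.getElem_of_eq hsplit.symm (by omega)]
    exact List.getElem_append_left hk
  have hget2 : ∀ k (hk : k < avail.length) (hge : l1.length ≤ k), avail[k] = l2[k - l1.length]'(by omega) := by
    intro k hk hge
    rw [List.getElem_of_eq hsplit.symm (by omega)]
    exact List.getElem_append_right hge
  have h1 : ∀ k (h : k < avail.length), k < l1.length → avail[k] < num := by
    intro k h hk
    rw [hget1 k hk]
    exact hlt1 _ (List.getElem_mem _)
  have h2 : ∀ k (h : k < avail.length), l1.length ≤ k → num ≤ avail[k] := by
    intro k h hk
    rw [hget2 k h hk]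
    exact hge2 _ (List.getElem_mem _)
  have hbl : pvBisect avail num 0 avail.length = l1.length :=
    pvBisect_eq avail num l1.length h1 h2 0 avail.length (Nat.zero_le _) (by omega) (le_refl _)
  by_cases hc1 : l1.length = avail.length
  · -- all free positions are below num: A picks the last one, B pops index t-1
    have halllt : ∀ i ∈ avail, i < num := by
      intro i hi
      rw [← hsplit] at hi
      rcases List.mem_append.mp hi with h | h
      · exact hlt1 _ h
      · have : l2 = [] := List.eq_nil_of_length_eq_zero (by omega)
        rw [this] at h; simp at h
    have hbest : (avail.foldl (pvCore num) (-1, none)).1 = avail[l1.length - 1]'(by omega) := by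
      rw [pvFold_phase1 num avail hs halllt hne]
      rw [List.getLast_eq_getElem]
      simp [show avail.length - 1 = l1.length - 1 from by omega]
    refine pvStep_core n perm visited avail num hlen hav (l1.length - 1) (by omega) hbest ?_
    rw [hbl, if_pos (Or.inl hc1)]
  · by_cases hc0 : l1.length = 0
    · -- all free positions are ≥ num: A picks the first one, B pops index 0
      have hl1nil : l1 = [] := List.eq_nil_of_length_eq_zero hc0
      have hgeAll : ∀ i ∈ avail, num ≤ i := by
        intro i hi
        rw [← hsplit, hl1nil, List.nil_append] at hi
        exact hge2 _ hi
      have hbest : (avail.foldl (pvCore num) (-1, none)).1 = avail[0]'hpos := by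
        have hp' : (avail.head hne :: avail.tail).Pairwise (· < ·) := by
          rw [List.cons_head_tail]; exact hs
        have hge' : ∀ i ∈ avail.head hne :: avail.tail, num ≤ i := by
          rw [List.cons_head_tail]; exact hgeAll
        conv_lhs => rw [← List.cons_head_tail hne]
        rw [pvFold_phase2_none num _ _ hp' hge' (-1)]
        rw [List.head_eq_getElem]
      refine pvStep_core n perm visited avail num hlen hav 0 hpos hbest ?_
      rw [hbl, if_neg, hc0]
      rintro (h | ⟨h0, _⟩)
      · exact hc1 h
      · omega
    · -- num falls between two free positions: compare predecessor and successor
      have ht1 : 0 < l1.length := Nat.pos_of_ne_zero hc0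
      have ht2 : l1.length < avail.length := lt_of_le_of_ne (by omega) hc1
      have hl1ne : l1 ≠ [] := fun h => hc0 (by rw [h]; rfl)
      have hl2ne : l2 ≠ [] := fun h => by rw [h] at hlen12; simp at hlen12; omega
      have hgL : avail[l1.length - 1]'(by omega) = l1.getLast hl1ne := by
        rw [hget1 (l1.length - 1) (by omega), List.getLast_eq_getElem]
      have hgb : avail[l1.length]'ht2 = l2.head hl2ne := by
        rw [hget2 l1.length ht2 (le_refl _), List.head_eq_getElem]
        simp
      have hfold1 : l1.foldl (pvCore num) (-1, none) =
          (l1.getLast hl1ne, some (num - l1.getLast hl1ne)) :=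
        pvFold_phase1 num l1 hpl1 hlt1 hl1ne
      have hp2' : (l2.head hl2ne :: l2.tail).Pairwise (· < ·) := by
        rw [List.cons_head_tail]; exact hpl2
      have hge2' : ∀ i ∈ l2.head hl2ne :: l2.tail, num ≤ i := by
        rw [List.cons_head_tail]; exact hge2
      have hfold : avail.foldl (pvCore num) (-1, none) =
          if l2.head hl2ne - num < num - l1.getLast hl1ne
          then (l2.head hl2ne, some (l2.head hl2ne - num))
          else (l1.getLast hl1ne, some (num - l1.getLast hl1ne)) := by
        conv_lhs => rw [← hsplit]
        rw [List.foldl_append, hfold1]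
        conv_lhs => rw [← List.cons_head_tail hl2ne]
        exact pvFold_phase2_some num _ _ hp2' hge2' _ _
      have hvm1 : PySem.List.pyGetD avail ((l1.length : Int) - 1) 0 = l1.getLast hl1ne := by
        have hcast : ((l1.length : Int) - 1) = ((l1.length - 1 : Nat) : Int) := by omega
        rw [hcast, PySem.List.pyGetD_natCast, List.getD_eq_getElem?_getD,
           List.getElem?_eq_getElem (by omega : l1.length - 1 < avail.length)]
        simpa using hgL
      have hvm2 : PySem.List.pyGetD avail ((l1.length : Int)) 0 = l2.head hl2ne := by
        rw [PySem.List.pyGetD_natCast, List.getD_eq_getElem?_getD,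
           List.getElem?_eq_getElem ht2]
        simpa using hgb
      by_cases hC : num - l1.getLast hl1ne ≤ l2.head hl2ne - num
      · -- tie or predecessor closer: both take the predecessor
        have hbest : (avail.foldl (pvCore num) (-1, none)).1 = avail[l1.length - 1]'(by omega) := by
          rw [hfold, if_neg (by omega), hgL]
        refine pvStep_core n perm visited avail num hlen hav (l1.length - 1) (by omega) hbest ?_
        rw [hbl, if_pos (Or.inr ⟨ht1, by rw [hvm1, hvm2]; exact hC⟩)]
      · -- successor strictly closer: both take the successor
        have hbest : (avail.foldl (pvCore num) (-1, none)).1 = avail[l1.length]'ht2 := by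
          rw [hfold, if_pos (by omega), hgb]
        refine pvStep_core n perm visited avail num hlen hav l1.length ht2 hbest ?_
        rw [hbl, if_neg]
        rintro (h | ⟨_, hle⟩)
        · exact hc1 h
        · rw [hvm1, hvm2] at hle
          omega

-- the main invariant induction over the sorted list.
theorem pvMain (n : Nat) (xs : List Int) : ∀ (perm : List Int) (visited : List Bool) (avail : List Int),
    visited.length = n →
    avail = (PySem.List.pyRange 0 (n : Int) 1).filter (fun i => !(PySem.List.pyGetD visited i false)) →
    avail.length = xs.length →
    (xs.foldl (pvStepA (n : Int)) (perm, visited)).1 = (xs.foldl pvStepB (perm, avail)).1 := by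
  induction xs with
  | nil => intro perm visited avail _ _ _; rfl
  | cons num xs ih =>
    intro perm visited avail hlen hav hlenav
    have hne : avail ≠ [] := by
      intro h
      rw [h] at hlenav
      simp at hlenav
    obtain ⟨e1, e2, e3, e4⟩ := pvStep_eq n perm visited avail num hlen hav hne
    rw [List.foldl_cons, List.foldl_cons]
    rw [show pvStepA (n : Int) (perm, visited) num =
          ((pvStepA (n : Int) (perm, visited) num).1, (pvStepA (n : Int) (perm, visited) num).2) from rfl,
        show pvStepB (perm, avail) num =
          ((pvStepB (perm, avail) num).1, (pvStepB (perm, avail) num).2) from rfl,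
        e1]
    refine ih _ _ _ e2 e3 ?_
    simp only [List.length_cons] at hlenav
    omega

-- ===== VERDICT (by name: the statement is the Claim_ definition above) =====
theorem min_score_permutation_spec : Claim_equal_min_score_permutation := by
  intro nums _
  unfold Spec_min_score_permutation min_score_permutation min_score_permutation_alt
  refine pvMain nums.length (PySem.List.sorted nums id) _ _ _ (by simp) ?_ ?_
  · refine (List.filter_eq_self.mpr ?_).symm
    intro i hi
    have hib := PySem.List.mem_pyRange_one.mp hi
    rw [PySem.List.pyGetD_of_nonneg _ false hib.1, List.getD_eq_getElem?_getD]
    by_cases h : i.toNat < nums.length <;> simp [h]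
  · simp [PySem.List.length_pyRange_one, PySem.List.length_sorted]
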